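-- pv_equiv track=rewrite | github.com/jesseliu0913/dg_tunning | umls_ppo.py | preprocess_conversation
-- ===== SOURCE A (Python) =====
-- def preprocess_conversation(conversation):
--     input_texts, output_texts = [], []
--     for i in range(len(conversation)):
--         line = conversation[i].strip()
--         if line.startswith("Doctor:"):
--             if i == 0 or conversation[i - 1].strip().startswith("Doctor:"):
--                 continue
--             input_text = ' '.join(conversation[:i]).strip()
--             output_text = line[len("Doctor:"):].strip()
--             input_texts.append(input_text)
--             output_texts.append(output_text)
--     return input_texts, output_texts
-- ===== SOURCE B (Python) =====
-- def preprocess_conversation(conversation):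
--     # One pass: maintain the running ' '-joined prefix incrementally instead of
--     # rejoining conversation[:i] at every Doctor line.
--     input_texts, output_texts = [], []
--     prefix = None            # ' '.join of all lines seen so far (None before the first)
--     prev_doctor = False      # whether the previous stripped line starts with "Doctor:"
--     for raw in conversation:
--         line = raw.strip()
--         is_doc = line.startswith("Doctor:")
--         if is_doc and prefix is not None and not prev_doctor:
--             input_texts.append(prefix.strip())
--             output_texts.append(line[len("Doctor:"):].strip())
--         if prefix is None:
--             prefix = raw
--         else:
--             prefix += " " + raw
--         prev_doctor = is_doc
--     return input_texts, output_texts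
-- ===== Notes on version B (the rewrite author's own statement) =====
-- stated objective: alternative
-- what changed: Single pass that maintains the running space-joined prefix and a previous-line-is-Doctor flag incrementally, instead of indexing, re-stripping conversation[i-1] and rejoining conversation[:i] at each Doctor line.
import Mathlib
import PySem

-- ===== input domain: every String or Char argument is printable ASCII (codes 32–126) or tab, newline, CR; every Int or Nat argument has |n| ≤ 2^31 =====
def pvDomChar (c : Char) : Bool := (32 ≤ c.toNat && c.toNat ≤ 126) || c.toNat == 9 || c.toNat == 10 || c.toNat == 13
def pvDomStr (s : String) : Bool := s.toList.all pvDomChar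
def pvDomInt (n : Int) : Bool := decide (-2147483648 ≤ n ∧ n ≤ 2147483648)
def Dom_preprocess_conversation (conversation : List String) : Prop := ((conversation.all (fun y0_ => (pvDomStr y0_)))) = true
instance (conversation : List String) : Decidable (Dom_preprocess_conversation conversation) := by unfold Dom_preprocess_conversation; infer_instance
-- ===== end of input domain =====

-- B replaces A's indexed loop with per-Doctor-line rejoin of conversation[:i] by one pass that
-- maintains the running space-joined prefix and a previous-line flag (objective: alternative).

-- ===== PORT A =====
def preprocess_conversation (conversation : List String) : List String × List String :=
  (PySem.List.pyRange 0 (conversation.length : Int) 1).foldl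
    (fun (acc : List String × List String) i =>
      let line := PySem.Str.strip (PySem.List.pyGetD conversation i "")
      if PySem.Str.startswith line "Doctor:" then
        if i == 0 || PySem.Str.startswith
            (PySem.Str.strip (PySem.List.pyGetD conversation (i - 1) "")) "Doctor:" then
          acc
        else
          (acc.1 ++ [PySem.Str.strip (PySem.Str.join " " (PySem.List.slice conversation none (some i)))],
           acc.2 ++ [PySem.Str.strip (PySem.Str.slice line (some 7) none)])
      else acc)
    ([], [])

-- ===== PORT B =====
structure PCState where
  ins : List String
  outs : List String
  pre : Option String
  prevDoc : Bool
deriving Repr, DecidableEq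

def pcStep (st : PCState) (raw : String) : PCState :=
  let line := PySem.Str.strip raw
  let isDoc := PySem.Str.startswith line "Doctor:"
  let pair :=
    if isDoc && st.pre.isSome && !st.prevDoc then
      (st.ins ++ [PySem.Str.strip (st.pre.getD "")],
       st.outs ++ [PySem.Str.strip (PySem.Str.slice line (some 7) none)])
    else (st.ins, st.outs)
  { ins := pair.1, outs := pair.2,
    pre := some (match st.pre with | none => raw | some p => p ++ " " ++ raw),
    prevDoc := isDoc }

def preprocess_conversation_alt (conversation : List String) : List String × List String :=
  let fin := conversation.foldl pcStep ⟨[], [], none, false⟩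
  (fin.ins, fin.outs)

-- ===== PRECONDITION & SPEC =====
def Spec_preprocess_conversation (conversation : List String) (out : List String × List String) : Prop := out = preprocess_conversation_alt conversation
instance (conversation : List String) (out : List String × List String) : Decidable (Spec_preprocess_conversation conversation out) := by unfold Spec_preprocess_conversation; infer_instance

-- ===== CLAIM (what is proved, stated in full; the proofs are below) =====
def Claim_equal_preprocess_conversation : Prop := ∀ (conversation : List String), Dom_preprocess_conversation conversation → Spec_preprocess_conversation conversation (preprocess_conversation conversation)

-- ===== LEMMAS AND PROOFS =====

-- whether the last line of c (if any) is a stripped "Doctor:" line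
def prevFlag (c : List String) : Bool :=
  match c with
  | [] => false
  | _ => PySem.Str.startswith (PySem.Str.strip (c.getD (c.length - 1) "")) "Doctor:"

theorem chars_join_snoc (sep : List Char) (l : List (List Char)) (x : List Char) (h : l ≠ []) :
    PySem.Chars.join sep (l ++ [x]) = PySem.Chars.join sep l ++ sep ++ x := by
  induction l with
  | nil => exact absurd rfl h
  | cons a t ih =>
    cases t with
    | nil => simp [PySem.Chars.join_cons_cons, PySem.Chars.join_singleton]
    | cons b t' =>
      simp only [List.cons_append]
      rw [PySem.Chars.join_cons_cons, PySem.Chars.join_cons_cons]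
      rw [show (b :: (t' ++ [x])) = (b :: t') ++ [x] from rfl, ih (by simp)]
      simp [List.append_assoc]

theorem str_join_snoc (c : List String) (x : String) (h : c ≠ []) :
    PySem.Str.join " " (c ++ [x]) = PySem.Str.join " " c ++ " " ++ x := by
  apply String.toList_inj.mp
  have h2 : (c.map String.toList) ≠ [] := by simpa using h
  simp [chars_join_snoc [' '] (c.map String.toList) x.toList h2, List.append_assoc]

theorem str_join_singleton (x : String) : PySem.Str.join " " [x] = x := by
  apply String.toList_inj.mp
  simp [PySem.Chars.join_singleton]

-- A's fold step over c ++ [x], restricted to indices of c, is A's fold step over c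
theorem A_congr (c : List String) (x : String) (acc : List String × List String)
    (i : Int) (hi : i ∈ PySem.List.pyRange 0 (c.length : Int) 1) :
    (fun (acc : List String × List String) i =>
      let line := PySem.Str.strip (PySem.List.pyGetD (c ++ [x]) i "")
      if PySem.Str.startswith line "Doctor:" then
        if i == 0 || PySem.Str.startswith
            (PySem.Str.strip (PySem.List.pyGetD (c ++ [x]) (i - 1) "")) "Doctor:" then
          acc
        else
          (acc.1 ++ [PySem.Str.strip (PySem.Str.join " " (PySem.List.slice (c ++ [x]) none (some i)))],
           acc.2 ++ [PySem.Str.strip (PySem.Str.slice (PySem.Str.strip (PySem.List.pyGetD (c ++ [x]) i "")) (some 7) none)])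
      else acc) acc i =
    (fun (acc : List String × List String) i =>
      let line := PySem.Str.strip (PySem.List.pyGetD c i "")
      if PySem.Str.startswith line "Doctor:" then
        if i == 0 || PySem.Str.startswith
            (PySem.Str.strip (PySem.List.pyGetD c (i - 1) "")) "Doctor:" then
          acc
        else
          (acc.1 ++ [PySem.Str.strip (PySem.Str.join " " (PySem.List.slice c none (some i)))],
           acc.2 ++ [PySem.Str.strip (PySem.Str.slice (PySem.Str.strip (PySem.List.pyGetD c i "")) (some 7) none)])
      else acc) acc i := by
  rw [PySem.List.mem_pyRange_one] at hi
  obtain ⟨h0, hlt⟩ := hi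
  obtain ⟨k, rfl⟩ : ∃ k : Nat, i = (k : Int) := ⟨i.toNat, (Int.toNat_of_nonneg h0).symm⟩
  have hk : k < c.length := by exact_mod_cast hlt
  have hget : PySem.List.pyGetD (c ++ [x]) (k : Int) "" = PySem.List.pyGetD c (k : Int) "" := by
    rw [PySem.List.pyGetD_natCast, PySem.List.pyGetD_natCast, List.getD_append _ _ _ _ hk]
  simp only [hget]
  by_cases hk0 : k = 0
  · subst hk0; simp
  · have hne : ((k : Int) == 0) = false := by simp; omega
    have hprev : PySem.List.pyGetD (c ++ [x]) ((k : Int) - 1) "" = PySem.List.pyGetD c ((k : Int) - 1) "" := by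
      have : ((k : Int) - 1) = ((k - 1 : Nat) : Int) := by omega
      rw [this, PySem.List.pyGetD_natCast, PySem.List.pyGetD_natCast,
        List.getD_append _ _ _ _ (by omega)]
    have hslice : PySem.List.slice (c ++ [x]) none (some (k : Int)) = PySem.List.slice c none (some (k : Int)) := by
      rw [PySem.List.slice_to_natCast, PySem.List.slice_to_natCast,
        List.take_append_of_le_length (by omega)]
    simp only [hne, hprev, hslice]

-- A over c ++ [x] is A over c plus (at most) one pair for the new last line
theorem A_snoc (c : List String) (x : String) :
    preprocess_conversation (c ++ [x]) =
      (if PySem.Str.startswith (PySem.Str.strip x) "Doctor:" &&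
          !(decide (c = []) || prevFlag c) then
        ((preprocess_conversation c).1 ++ [PySem.Str.strip (PySem.Str.join " " c)],
         (preprocess_conversation c).2 ++
           [PySem.Str.strip (PySem.Str.slice (PySem.Str.strip x) (some 7) none)])
      else preprocess_conversation c) := by
  unfold preprocess_conversation
  have hlen : ((c ++ [x]).length : Int) = (c.length : Int) + 1 := by simp
  rw [hlen, PySem.List.pyRange_one_succ_right (by positivity), List.foldl_append,
    PySem.List.foldl_congr_mem _ _ _ _ (fun acc i hi => A_congr c x acc i hi)]
  have hgetx : PySem.List.pyGetD (c ++ [x]) ((c.length : Nat) : Int) "" = x := by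
    rw [PySem.List.pyGetD_natCast]
    simp [List.getD]
  simp only [List.foldl_cons, List.foldl_nil, hgetx]
  cases c with
  | nil => simp [prevFlag]
  | cons a t =>
    have hne0 : (((a :: t).length : Int) == 0) = false := by
      simp only [beq_eq_false_iff_ne, ne_eq, List.length_cons]
      intro hcon; omega
    have hprev : PySem.List.pyGetD ((a :: t) ++ [x]) (((a :: t).length : Int) - 1) ""
        = (a :: t).getD ((a :: t).length - 1) "" := by
      have h1 : (((a :: t).length : Int) - 1) = (((a :: t).length - 1 : Nat) : Int) := by
        simp only [List.length_cons]; omega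
      rw [h1, PySem.List.pyGetD_natCast, List.getD_append _ _ _ _ (by simp)]
    have hslice : PySem.List.slice ((a :: t) ++ [x]) none (some ((a :: t).length : Int))
        = (a :: t) := by
      rw [PySem.List.slice_to_natCast, List.take_left]
    have hd0 : decide ((a :: t : List String) = []) = false := by simp
    rw [hne0, hprev, hslice, hd0]
    simp only [prevFlag, Bool.false_or]
    cases hC1 : PySem.Str.startswith (PySem.Str.strip x) "Doctor:"
    · rw [if_neg (by simp), if_neg (by simp)]
    · cases hC2 : PySem.Str.startswith
          (PySem.Str.strip ((a :: t).getD ((a :: t).length - 1) "")) "Doctor:"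
      · rw [if_pos (by simp), if_neg (by simp), if_pos (by simp)]
      · rw [if_pos (by simp), if_pos (by simp), if_neg (by simp)]

-- loop invariant: B's fold state carries A's answer, the joined prefix, and the last-line flag
theorem pc_inv (c : List String) :
    c.foldl pcStep ⟨[], [], none, false⟩ =
      ⟨(preprocess_conversation c).1, (preprocess_conversation c).2,
       (match c with | [] => none | _ => some (PySem.Str.join " " c)),
       prevFlag c⟩ := by
  induction c using List.reverseRecOn with
  | nil => simp [preprocess_conversation, PySem.List.pyRange_one_eq_nil, prevFlag]
  | append_singleton c x ih =>
    rw [List.foldl_append, List.foldl_cons, List.foldl_nil, ih, A_snoc]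
    cases c with
    | nil =>
      simp only [pcStep, prevFlag, List.nil_append]
      simp [str_join_singleton, List.getD]
    | cons a t =>
      have hjoin := str_join_snoc (a :: t) x (by simp)
      have hlast : ((a :: t) ++ [x]).getD (((a :: t) ++ [x]).length - 1) "" = x := by
        simp [List.getD]
      have hd0 : decide ((a :: t : List String) = []) = false := by simp
      simp only [pcStep, prevFlag, hjoin, hlast, hd0, Bool.false_or,
        Option.isSome_some, Bool.and_true]
      cases hC1 : PySem.Str.startswith (PySem.Str.strip x) "Doctor:"
      · simp
      · cases hC2 : PySem.Str.startswith
            (PySem.Str.strip ((a :: t).getD ((a :: t).length - 1) "")) "Doctor:"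
        · simp
        · simp

-- ===== VERDICT (by name: the statement is the Claim_ definition above) =====
theorem preprocess_conversation_spec : Claim_equal_preprocess_conversation := by
  intro conversation _
  unfold Spec_preprocess_conversation preprocess_conversation_alt
  rw [pc_inv]
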